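-- pv_equiv track=rewrite | github.com/dog2humen/ForTheCoffee | leetcode_everyday/pastqing_interview_1713.py | respace_v1
-- ===== SOURCE A (Python) =====
-- from typing import List
--
-- def respace_v1(dictionary: List[str], sentence: str) -> int:
--     '''
--         dp解法
--         dp[i]表示sentence以i位置为结尾的最小匹配数
--         状态转移方程:
--             1. 若第i个字符不匹配, 则dp[i] = dp[i - 1] + 1
--             2. 遍历前sentence的i-1个, 若以其中某个下标id为开头, 以i为结尾的单词在dictionary里(匹配到了), 则dp[i] = min(dp[idx], dp[i])
--         初始化:
--             dp长度为len(sentence) + 1, 预留空的匹配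
--             dp[0] = 0
--     '''
--     size = len(sentence)
--     dp = [0 for _ in range(size + 1)]
--     dp[0] = 0
--
--     for i in range(1, size + 1):
--         dp[i] = dp[i - 1] + 1
--         for j in range(i):
--             if sentence[j : i] in dictionary:
--                 dp[i] = min(dp[j], dp[i])
--
--     return dp[-1]
-- ===== SOURCE B (Python) =====
-- from typing import List
--
-- def respace_v1(dictionary: List[str], sentence: str) -> int:
--     # Word-driven forward DP: for each end position try only the dictionary
--     # words as suffixes, instead of scanning every split point against the list.
--     n = len(sentence)
--     dp = [0]
--     for i in range(1, n + 1):
--         best = dp[i - 1] + 1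
--         for w in dictionary:
--             lw = len(w)
--             if 0 < lw <= i and sentence[i - lw:i] == w:
--                 cand = dp[i - lw]
--                 if cand < best:
--                     best = cand
--         dp.append(best)
--     return dp[n]
-- ===== Notes on version B (the rewrite author's own statement) =====
-- stated objective: faster
-- what changed: B replaces A's scan over all O(n^2) substrings with an 'in dictionary' list search at each one by a word-driven DP that, for each end position, tries only the dictionary words as suffixes (one slice comparison per word), and builds dp by appending instead of in-place updates.
import Mathlib
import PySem

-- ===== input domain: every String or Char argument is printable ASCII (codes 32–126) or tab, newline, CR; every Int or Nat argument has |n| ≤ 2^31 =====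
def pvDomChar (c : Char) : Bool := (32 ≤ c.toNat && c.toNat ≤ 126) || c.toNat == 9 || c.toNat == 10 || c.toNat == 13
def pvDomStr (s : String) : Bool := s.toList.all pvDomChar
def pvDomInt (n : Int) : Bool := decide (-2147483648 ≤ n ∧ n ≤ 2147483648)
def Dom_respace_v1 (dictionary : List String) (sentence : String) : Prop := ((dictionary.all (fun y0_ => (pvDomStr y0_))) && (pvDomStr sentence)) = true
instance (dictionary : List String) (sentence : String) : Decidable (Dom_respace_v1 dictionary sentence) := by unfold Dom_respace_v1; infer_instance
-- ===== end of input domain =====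

-- B replaces A's all-split-points substring scan by a word-driven suffix DP (same values, fewer
-- candidate checks per position); the equivalence of the two DP tables is proved below.
-- ===== PORT A =====
def respace_v1 (dictionary : List String) (sentence : String) : Int :=
  let size : Int := PySem.Str.len sentence
  let dp : List Int := (PySem.List.pyRange 0 (size + 1) 1).map (fun _ => (0 : Int))
  let dp := dp.set 0 0
  let dp := (PySem.List.pyRange 1 (size + 1) 1).foldl (fun dp i =>
      let dp := dp.set i.toNat (PySem.List.pyGetD dp (i - 1) 0 + 1)
      (PySem.List.pyRange 0 i 1).foldl (fun dp j =>
        if dictionary.contains (PySem.Str.slice sentence (some j) (some i)) then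
          dp.set i.toNat (min (PySem.List.pyGetD dp j 0) (PySem.List.pyGetD dp i 0))
        else dp) dp) dp
  PySem.List.pyGetD dp (-1) 0

-- ===== PORT B =====
def respace_v1_alt (dictionary : List String) (sentence : String) : Int :=
  let n : Int := PySem.Str.len sentence
  let dp : List Int := [0]
  let dp := (PySem.List.pyRange 1 (n + 1) 1).foldl (fun dp i =>
      let best := PySem.List.pyGetD dp (i - 1) 0 + 1
      let best := dictionary.foldl (fun best w =>
          let lw : Int := PySem.Str.len w
          if 0 < lw ∧ lw ≤ i ∧ PySem.Str.slice sentence (some (i - lw)) (some i) == w then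
            let cand := PySem.List.pyGetD dp (i - lw) 0
            if cand < best then cand else best
          else best) best
      dp ++ [best]) dp
  PySem.List.pyGetD dp n 0

-- ===== PRECONDITION & SPEC =====
def Spec_respace_v1 (dictionary : List String) (sentence : String) (out : Int) : Prop := out = respace_v1_alt dictionary sentence
instance (dictionary : List String) (sentence : String) (out : Int) : Decidable (Spec_respace_v1 dictionary sentence out) := by unfold Spec_respace_v1; infer_instance

-- ===== CLAIM (what is proved, stated in full; the proofs are below) =====
def Claim_equal_respace_v1 : Prop := ∀ (dictionary : List String) (sentence : String), Dom_respace_v1 dictionary sentence → Spec_respace_v1 dictionary sentence (respace_v1 dictionary sentence)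

-- ===== LEMMAS AND PROOFS =====

-- step of A's outer loop (identical to the lambda in the port of A)
def pvStepA (dictionary : List String) (sentence : String) (dp : List Int) (i : Int) : List Int :=
  let dp := dp.set i.toNat (PySem.List.pyGetD dp (i - 1) 0 + 1)
  (PySem.List.pyRange 0 i 1).foldl (fun dp j =>
    if dictionary.contains (PySem.Str.slice sentence (some j) (some i)) then
      dp.set i.toNat (min (PySem.List.pyGetD dp j 0) (PySem.List.pyGetD dp i 0))
    else dp) dp

-- step of B's outer loop (identical to the lambda in the port of B)
def pvStepB (dictionary : List String) (sentence : String) (dp : List Int) (i : Int) : List Int :=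
  let best := PySem.List.pyGetD dp (i - 1) 0 + 1
  let best := dictionary.foldl (fun best w =>
      let lw : Int := PySem.Str.len w
      if 0 < lw ∧ lw ≤ i ∧ PySem.Str.slice sentence (some (i - lw)) (some i) == w then
        let cand := PySem.List.pyGetD dp (i - lw) 0
        if cand < best then cand else best
      else best) best
  dp ++ [best]

lemma respace_v1_eq (dictionary : List String) (sentence : String) :
    respace_v1 dictionary sentence =
      PySem.List.pyGetD
        ((PySem.List.pyRange 1 (PySem.Str.len sentence + 1) 1).foldl (pvStepA dictionary sentence)
          (((PySem.List.pyRange 0 (PySem.Str.len sentence + 1) 1).map (fun _ => (0 : Int))).set 0 0))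
        (-1) 0 := rfl

lemma respace_v1_alt_eq (dictionary : List String) (sentence : String) :
    respace_v1_alt dictionary sentence =
      PySem.List.pyGetD
        ((PySem.List.pyRange 1 (PySem.Str.len sentence + 1) 1).foldl (pvStepB dictionary sentence) [0])
        (PySem.Str.len sentence) 0 := rfl

-- reading below the appended tail
lemma pyGetD_append_left (l r : List Int) (j : Int) (hj : 0 ≤ j) (hlt : j.toNat < l.length) :
    PySem.List.pyGetD (l ++ r) j 0 = PySem.List.pyGetD l j 0 := by
  rw [PySem.List.pyGetD_of_nonneg _ _ hj, PySem.List.pyGetD_of_nonneg _ _ hj]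
  rw [List.getD_eq_getElem _ _ (by simp; omega), List.getD_eq_getElem _ _ hlt]
  simp [List.getElem_append_left hlt]

lemma pyGetD_set_ne (l : List Int) (iN : Nat) (v j : Int) (hj : 0 ≤ j) (hne : j.toNat ≠ iN) :
    PySem.List.pyGetD (l.set iN v) j 0 = PySem.List.pyGetD l j 0 := by
  rw [PySem.List.pyGetD_of_nonneg _ _ hj, PySem.List.pyGetD_of_nonneg _ _ hj]
  unfold List.getD
  rw [List.getElem?_set_ne (Ne.symm hne)]

lemma pyGetD_set_self (l : List Int) (iN : Nat) (h : iN < l.length) (v : Int) :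
    PySem.List.pyGetD (l.set iN v) (iN : Int) 0 = v := by
  rw [PySem.List.pyGetD_of_nonneg _ _ (by positivity)]
  simp [h]

-- min-fold characterisation
lemma foldl_min_le_init (l : List Int) (v : Int) : l.foldl min v <= v := by
  induction l generalizing v with
  | nil => simp
  | cons x t ih => exact le_trans (ih (min v x)) (min_le_left v x)

lemma foldl_min_le_mem (l : List Int) (v x : Int) (h : x ∈ l) : l.foldl min v <= x := by
  induction l generalizing v with
  | nil => simp at h
  | cons y t ih =>
    rcases List.mem_cons.mp h with rfl | hx
    · exact le_trans (foldl_min_le_init t (min v x)) (min_le_right v x)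
    · exact ih (min v y) hx

lemma foldl_min_cases (l : List Int) (v : Int) : l.foldl min v = v ∨ l.foldl min v ∈ l := by
  induction l generalizing v with
  | nil => left; rfl
  | cons x t ih =>
    rcases ih (min v x) with h | h
    · rcases min_cases v x with ⟨hm, _⟩ | ⟨hm, _⟩
      · left; simp only [List.foldl_cons]; rw [h, hm]
      · right; simp only [List.foldl_cons]; rw [h, hm]; exact List.mem_cons_self
    · right; simp only [List.foldl_cons]; exact List.mem_cons_of_mem x h

lemma foldl_min_ext (l1 l2 : List Int) (v : Int) (h : ∀ x, x ∈ l1 ↔ x ∈ l2) :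
    l1.foldl min v = l2.foldl min v := by
  apply le_antisymm
  · rcases foldl_min_cases l2 v with h2 | h2
    · rw [h2]; exact foldl_min_le_init l1 v
    · exact foldl_min_le_mem l1 v _ ((h _).mpr h2)
  · rcases foldl_min_cases l1 v with h1 | h1
    · rw [h1]; exact foldl_min_le_init l2 v
    · exact foldl_min_le_mem l2 v _ ((h _).mp h1)

lemma foldl_ite_minA {α : Type} (P : α → Prop) [DecidablePred P] (f : α → Int) (l : List α) (v : Int) :
    l.foldl (fun v x => if P x then min (f x) v else v) v
      = ((l.filter (fun x => decide (P x))).map f).foldl min v := by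
  induction l generalizing v with
  | nil => rfl
  | cons x t ih =>
    by_cases hx : P x
    · simp only [List.foldl_cons, List.filter_cons, decide_eq_true_eq, hx, if_true, List.map_cons]
      rw [ih, min_comm]
    · simp [List.foldl_cons, hx, ih]

lemma foldl_ite_minB {α : Type} (Q : α → Prop) [DecidablePred Q] (g : α → Int) (l : List α) (v : Int) :
    l.foldl (fun v x => if Q x then (if g x < v then g x else v) else v) v
      = ((l.filter (fun x => decide (Q x))).map g).foldl min v := by
  induction l generalizing v with
  | nil => rfl
  | cons x t ih =>
    by_cases hx : Q x
    · simp only [List.foldl_cons, List.filter_cons, decide_eq_true_eq, hx, if_true, List.map_cons]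
      rw [ih, ← min_def_lt, min_comm]
    · simp [List.foldl_cons, hx, ih]

lemma foldl_min_ite_ext {α β : Type} (P : α → Prop) (Q : β → Prop) [DecidablePred P] [DecidablePred Q]
    (f : α → Int) (g : β → Int) (l1 : List α) (l2 : List β) (v : Int)
    (h : ∀ x, (∃ a ∈ l1, P a ∧ f a = x) ↔ (∃ b ∈ l2, Q b ∧ g b = x)) :
    l1.foldl (fun v a => if P a then min (f a) v else v) v
      = l2.foldl (fun v b => if Q b then (if g b < v then g b else v) else v) v := by
  rw [foldl_ite_minA, foldl_ite_minB]
  apply foldl_min_ext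
  intro x
  constructor
  · intro hx
    rcases List.mem_map.mp hx with ⟨a, ha, rfl⟩
    rcases List.mem_filter.mp ha with ⟨ha1, ha2⟩
    exact List.mem_map.mpr (by
      rcases (h (f a)).mp ⟨a, ha1, by simpa using ha2, rfl⟩ with ⟨b, hb1, hb2, hb3⟩
      exact ⟨b, List.mem_filter.mpr ⟨hb1, by simpa using hb2⟩, hb3⟩)
  · intro hx
    rcases List.mem_map.mp hx with ⟨b, hb, rfl⟩
    rcases List.mem_filter.mp hb with ⟨hb1, hb2⟩
    exact List.mem_map.mpr (by
      rcases (h (g b)).mpr ⟨b, hb1, by simpa using hb2, rfl⟩ with ⟨a, ha1, ha2, ha3⟩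
      exact ⟨a, List.mem_filter.mpr ⟨ha1, by simpa using ha2⟩, ha3⟩)

-- A's inner loop only rewrites slot iN; extract it as a scalar fold over the old table
lemma inner_extract (P : Int → Prop) [DecidablePred P] (dp : List Int) (iN : Nat) (hi : iN < dp.length)
    (js : List Int) (hjs : ∀ j ∈ js, 0 ≤ j ∧ j < (iN : Int)) (v : Int) :
    js.foldl (fun d j =>
        if P j then d.set iN (min (PySem.List.pyGetD d j 0) (PySem.List.pyGetD d (iN : Int) 0)) else d)
      (dp.set iN v)
    = dp.set iN (js.foldl (fun v j => if P j then min (PySem.List.pyGetD dp j 0) v else v) v) := by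
  induction js generalizing v with
  | nil => rfl
  | cons j t ih =>
    have hj := hjs j List.mem_cons_self
    have ht : ∀ j ∈ t, 0 ≤ j ∧ j < (iN : Int) := fun x hx => hjs x (List.mem_cons_of_mem j hx)
    by_cases hP : P j
    · simp only [List.foldl_cons, if_pos hP]
      rw [pyGetD_set_ne dp iN v j hj.1 (by omega), pyGetD_set_self dp iN hi v, List.set_set]
      exact ih ht _
    · simp only [List.foldl_cons, if_neg hP]
      exact ih ht v

-- length of sentence[j:i] for 0 <= j < i <= len(sentence)
lemma slice_len (s : String) (j i : Int) (h0 : 0 ≤ j) (h1 : j < i) (h2 : i ≤ (s.toList.length : Int)) :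
    PySem.Str.len (PySem.Str.slice s (some j) (some i)) = i - j := by
  rw [PySem.Str.len_eq, PySem.Str.toList_slice, PySem.Chars.slice_eq_listSlice,
    PySem.List.length_slice]
  unfold PySem.List.clampIdx
  split_ifs <;> push_cast <;> omega

-- the two candidate sets coincide
lemma cand_ext (dictionary : List String) (sentence : String) (dpB : List Int) (i : Int)
    (_h1 : 1 ≤ i) (h2 : i ≤ (sentence.toList.length : Int)) :
    ∀ x, (∃ j ∈ PySem.List.pyRange 0 i 1,
            (dictionary.contains (PySem.Str.slice sentence (some j) (some i)) = true) ∧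
            PySem.List.pyGetD dpB j 0 = x)
       ↔ (∃ w ∈ dictionary,
            (0 < PySem.Str.len w ∧ PySem.Str.len w ≤ i ∧
              (PySem.Str.slice sentence (some (i - PySem.Str.len w)) (some i) == w) = true) ∧
            PySem.List.pyGetD dpB (i - PySem.Str.len w) 0 = x) := by
  intro x
  constructor
  · rintro ⟨j, hjmem, hcont, hval⟩
    obtain ⟨hj0, hji⟩ := PySem.List.mem_pyRange_one.mp hjmem
    have hlw : PySem.Str.len (PySem.Str.slice sentence (some j) (some i)) = i - j :=
      slice_len sentence j i hj0 hji h2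
    have hidx : i - PySem.Str.len (PySem.Str.slice sentence (some j) (some i)) = j := by omega
    refine ⟨PySem.Str.slice sentence (some j) (some i), List.mem_of_elem_eq_true hcont,
      ⟨by omega, by omega, by rw [hidx]; exact beq_self_eq_true _⟩, by rw [hidx]; exact hval⟩
  · rintro ⟨w, hwmem, ⟨hpos, hle, hbeq⟩, hval⟩
    have heq : PySem.Str.slice sentence (some (i - PySem.Str.len w)) (some i) = w :=
      eq_of_beq hbeq
    refine ⟨i - PySem.Str.len w,
      PySem.List.mem_pyRange_one.mpr ⟨by omega, by omega⟩, ?_, hval⟩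
    rw [heq]
    exact List.elem_eq_true_of_mem hwmem

-- one outer step preserves the relation between the two tables
lemma step_eq (dictionary : List String) (sentence : String) (k : Nat)
    (hk : k < sentence.toList.length) (dpB : List Int) (hlen : dpB.length = k + 1) :
    pvStepA dictionary sentence (dpB ++ List.replicate (sentence.toList.length - k) 0) ((k : Int) + 1)
      = pvStepB dictionary sentence dpB ((k : Int) + 1)
          ++ List.replicate (sentence.toList.length - (k + 1)) 0 := by
  have hcast : ((k : Int) + 1) = ((k + 1 : Nat) : Int) := by push_cast; ring
  set n := sentence.toList.length with hn
  set dp := dpB ++ List.replicate (n - k) 0 with hdp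
  have hdplen : dp.length = n + 1 := by simp [hdp, hlen]; omega
  have hread : PySem.List.pyGetD dp ((k : Int) + 1 - 1) 0 = PySem.List.pyGetD dpB ((k : Int) + 1 - 1) 0 := by
    have : (k : Int) + 1 - 1 = (k : Int) := by ring
    rw [this]
    exact pyGetD_append_left dpB _ (k : Int) (by positivity) (by simp [hlen])
  unfold pvStepA
  rw [hread]
  have htoNat : ((k : Int) + 1).toNat = k + 1 := by omega
  rw [htoNat, hcast]
  rw [inner_extract (fun j => dictionary.contains
        (PySem.Str.slice sentence (some j) (some ((k + 1 : Nat) : Int))) = true)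
      dp (k + 1) (by omega)
      (PySem.List.pyRange 0 ((k + 1 : Nat) : Int) 1)
      (fun j hj => by
        obtain ⟨h0, h1⟩ := PySem.List.mem_pyRange_one.mp hj
        exact ⟨h0, by exact_mod_cast h1⟩)]
  have hfold :
      (PySem.List.pyRange 0 ((k + 1 : Nat) : Int) 1).foldl
          (fun v j => if dictionary.contains
              (PySem.Str.slice sentence (some j) (some ((k + 1 : Nat) : Int))) = true then
            min (PySem.List.pyGetD dp j 0) v else v)
          (PySem.List.pyGetD dpB (((k + 1 : Nat) : Int) - 1) 0 + 1)
        = (PySem.List.pyRange 0 ((k + 1 : Nat) : Int) 1).foldl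
          (fun v j => if dictionary.contains
              (PySem.Str.slice sentence (some j) (some ((k + 1 : Nat) : Int))) = true then
            min (PySem.List.pyGetD dpB j 0) v else v)
          (PySem.List.pyGetD dpB (((k + 1 : Nat) : Int) - 1) 0 + 1) := by
    apply PySem.List.foldl_congr_mem
    intro acc j hj
    obtain ⟨h0, h1⟩ := PySem.List.mem_pyRange_one.mp hj
    rw [pyGetD_append_left dpB _ j h0 (by simp [hlen]; omega)]
  rw [hfold]
  have hscalar :
      (PySem.List.pyRange 0 ((k + 1 : Nat) : Int) 1).foldl
          (fun v j => if dictionary.contains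
              (PySem.Str.slice sentence (some j) (some ((k + 1 : Nat) : Int))) = true then
            min (PySem.List.pyGetD dpB j 0) v else v)
          (PySem.List.pyGetD dpB (((k + 1 : Nat) : Int) - 1) 0 + 1)
        = dictionary.foldl
          (fun v w => if 0 < PySem.Str.len w ∧ PySem.Str.len w ≤ ((k + 1 : Nat) : Int) ∧
              (PySem.Str.slice sentence (some (((k + 1 : Nat) : Int) - PySem.Str.len w))
                (some ((k + 1 : Nat) : Int)) == w) = true then
            (if PySem.List.pyGetD dpB (((k + 1 : Nat) : Int) - PySem.Str.len w) 0 < v then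
              PySem.List.pyGetD dpB (((k + 1 : Nat) : Int) - PySem.Str.len w) 0 else v)
          else v)
          (PySem.List.pyGetD dpB (((k + 1 : Nat) : Int) - 1) 0 + 1) := by
    apply foldl_min_ite_ext
    apply cand_ext dictionary sentence dpB ((k + 1 : Nat) : Int) (by exact_mod_cast Nat.one_le_iff_ne_zero.mpr (by omega)) (by exact_mod_cast hk)
  rw [hscalar]
  have hset : ∀ best : Int, dp.set (k + 1) best = (dpB ++ [best]) ++ List.replicate (n - (k + 1)) 0 := by
    intro best
    rw [hdp, List.set_append, if_neg (by omega)]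
    have h1 : k + 1 - dpB.length = 0 := by omega
    rw [h1]
    have h2 : n - k = (n - (k + 1)) + 1 := by omega
    rw [h2, List.replicate_succ, List.set_cons_zero]
    simp
  rw [hset]
  unfold pvStepB
  rfl

lemma main_invariant (dictionary : List String) (sentence : String) (k : Nat)
    (hk : k ≤ sentence.toList.length) :
    (PySem.List.pyRange 1 ((k : Int) + 1) 1).foldl (pvStepA dictionary sentence)
        (((PySem.List.pyRange 0 (PySem.Str.len sentence + 1) 1).map (fun _ => (0 : Int))).set 0 0)
      = (PySem.List.pyRange 1 ((k : Int) + 1) 1).foldl (pvStepB dictionary sentence) [0]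
          ++ List.replicate (sentence.toList.length - k) 0
    ∧ ((PySem.List.pyRange 1 ((k : Int) + 1) 1).foldl (pvStepB dictionary sentence) [0]).length = k + 1 := by
  induction k with
  | zero =>
    have hr : PySem.List.pyRange 1 ((0 : Nat) + 1 : Int) 1 = [] :=
      PySem.List.pyRange_one_eq_nil (by norm_num)
    have hinit : ((PySem.List.pyRange 0 (PySem.Str.len sentence + 1) 1).map (fun _ => (0 : Int)))
        = List.replicate (sentence.toList.length + 1) 0 := by
      rw [List.eq_replicate_iff]
      refine ⟨?_, by simp⟩
      rw [List.length_map, PySem.List.length_pyRange_one, PySem.Str.len_eq]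
      omega
    constructor
    · rw [hr]
      simp only [List.foldl_nil]
      rw [hinit, List.replicate_succ, List.set_cons_zero]
      simp
    · rw [hr]
      rfl
  | succ k ih =>
    obtain ⟨ihA, ihL⟩ := ih (by omega)
    have hcast : (((k + 1 : Nat) : Int) + 1) = ((k : Int) + 1) + 1 := by push_cast; ring
    have hpeel : PySem.List.pyRange 1 (((k + 1 : Nat) : Int) + 1) 1
        = PySem.List.pyRange 1 ((k : Int) + 1) 1 ++ [(k : Int) + 1] := by
      rw [hcast]
      exact PySem.List.pyRange_one_succ_right (by omega)
    rw [hpeel, List.foldl_append, List.foldl_append, ihA]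
    simp only [List.foldl_cons, List.foldl_nil]
    constructor
    · exact step_eq dictionary sentence k (by omega) _ ihL
    · have hlenstep : ∀ (dp : List Int) (i : Int),
          (pvStepB dictionary sentence dp i).length = dp.length + 1 := by
        intro dp i
        unfold pvStepB
        simp
      rw [hlenstep, ihL]

lemma pyGetD_neg_one (l : List Int) (m : Nat) (h : l.length = m + 1) :
    PySem.List.pyGetD l (-1) 0 = PySem.List.pyGetD l (m : Int) 0 := by
  unfold PySem.List.pyGetD PySem.List.pyGet? PySem.List.pyIdx?
  rw [h]
  have h1 : ¬ ((0 : Int) ≤ -1) := by omega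
  have h2 : (-(((m : Nat) + 1 : Nat) : Int) ≤ -1) := by omega
  have h3 : (0 : Int) ≤ (m : Int) := by omega
  have h4 : ((m : Int) < ((m + 1 : Nat) : Int)) := by omega
  rw [if_neg h1, if_pos h2, if_pos h3, if_pos h4]
  norm_num

-- ===== VERDICT (by name: the statement is the Claim_ definition above) =====
theorem respace_v1_spec : Claim_equal_respace_v1 := by
  intro dictionary sentence _
  unfold Spec_respace_v1
  rw [respace_v1_eq, respace_v1_alt_eq]
  obtain ⟨hA, hL⟩ := main_invariant dictionary sentence sentence.toList.length le_rfl
  have hn : PySem.Str.len sentence = (sentence.toList.length : Int) := PySem.Str.len_eq sentence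
  rw [hn] at hA ⊢
  rw [hA]
  rw [Nat.sub_self, List.replicate_zero, List.append_nil]
  exact pyGetD_neg_one _ _ hL
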